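-- pv_equiv track=rewrite | github.com/yswang168/witness | run.py | generate_dlv_maps
-- ===== SOURCE A (Python) =====
-- def generate_dlv_maps(a):
--     to_dlv_map = {}
--     from_dlv_map = {}
--     for i in range(1, a+1):
--         x = i
--         s = ""
--         while x > 0:
--             s += chr(x%26 + ord('a'))
--             x//=26
--         to_dlv_map[i] = s
--         from_dlv_map[s] = i
--     return (to_dlv_map, from_dlv_map)
-- ===== SOURCE B (Python) =====
-- def generate_dlv_maps(a):
--     to_dlv_map = {}
--     from_dlv_map = {}
--     digits = [1]  # base-26 digits of the current i, least-significant first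
--     for i in range(1, a + 1):
--         s = ''.join(chr(d + ord('a')) for d in digits)
--         to_dlv_map[i] = s
--         from_dlv_map[s] = i
--         # increment the odometer for the next i
--         j = 0
--         while True:
--             digits[j] += 1
--             if digits[j] < 26:
--                 break
--             digits[j] = 0
--             j += 1
--             if j == len(digits):
--                 digits.append(1)
--                 break
--     return (to_dlv_map, from_dlv_map)
-- ===== Notes on version B (the rewrite author's own statement) =====
-- stated objective: alternative
-- what changed: Replaces per-i digit extraction by repeated remainder/quotient division with a single running base-twentysix odometer (digit list, least-significant first) incremented once per iteration, so no division is performed.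
import Mathlib
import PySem

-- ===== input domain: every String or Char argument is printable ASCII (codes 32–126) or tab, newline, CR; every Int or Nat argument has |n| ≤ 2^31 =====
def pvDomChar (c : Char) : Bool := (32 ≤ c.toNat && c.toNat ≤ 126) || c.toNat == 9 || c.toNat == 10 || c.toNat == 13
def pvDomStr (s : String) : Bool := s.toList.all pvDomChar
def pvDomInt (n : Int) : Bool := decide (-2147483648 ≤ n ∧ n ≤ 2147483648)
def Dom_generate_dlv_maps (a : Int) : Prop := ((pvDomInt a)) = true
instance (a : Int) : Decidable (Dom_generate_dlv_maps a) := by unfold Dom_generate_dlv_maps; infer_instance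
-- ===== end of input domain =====

-- B replaces per-i repeated //26,%26 digit extraction by a running base-26 odometer incremented once per i (alternative decomposition, no division).


-- ===== PORT A =====
-- while x > 0: s += chr(x%26 + ord('a')); x //= 26   (string as List Char)
def pvAInner (x : Int) (s : List Char) : List Char :=
  if x > 0 then
    pvAInner (PySem.Int.floordiv x 26) (s ++ [Char.ofNat (PySem.Int.mod x 26 + 97).toNat])
  else s
termination_by x.toNat
decreasing_by
  rw [PySem.Int.floordiv_eq_ediv_of_pos (by norm_num : (0:Int) < 26)]
  omega

def pvStepA (m : PySem.Dict Int String × PySem.Dict String Int) (i : Int) :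
    PySem.Dict Int String × PySem.Dict String Int :=
  let s := String.ofList (pvAInner i [])
  (m.1.insert i s, m.2.insert s i)

def generate_dlv_maps (a : Int) : (List (Int × String)) × (List (String × Int)) :=
  let m := (PySem.List.pyRange 1 (a + 1) 1).foldl pvStepA (PySem.Dict.empty, PySem.Dict.empty)
  (m.1.items, m.2.items)

-- ===== PORT B =====
-- the odometer increment: digits[j] += 1; carry 0s; append a final 1 past the end
def pvInc : List Int → List Int
  | [] => [1]
  | d :: ds => if d + 1 < 26 then (d + 1) :: ds else 0 :: pvInc ds

def pvStepB (st : PySem.Dict Int String × PySem.Dict String Int × List Int) (i : Int) :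
    PySem.Dict Int String × PySem.Dict String Int × List Int :=
  let s := String.ofList (st.2.2.map (fun d => Char.ofNat (d + 97).toNat))
  (st.1.insert i s, st.2.1.insert s i, pvInc st.2.2)

def generate_dlv_maps_alt (a : Int) : (List (Int × String)) × (List (String × Int)) :=
  let t := (PySem.List.pyRange 1 (a + 1) 1).foldl pvStepB (PySem.Dict.empty, PySem.Dict.empty, [1])
  (t.1.items, t.2.1.items)

-- ===== PRECONDITION & SPEC =====
def Spec_generate_dlv_maps (a : Int) (out : (List (Int × String)) × (List (String × Int))) : Prop := out = generate_dlv_maps_alt a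
instance (a : Int) (out : (List (Int × String)) × (List (String × Int))) : Decidable (Spec_generate_dlv_maps a out) := by unfold Spec_generate_dlv_maps; infer_instance

-- ===== CLAIM (what is proved, stated in full; the proofs are below) =====
def Claim_equal_generate_dlv_maps : Prop := ∀ (a : Int), Dom_generate_dlv_maps a → Spec_generate_dlv_maps a (generate_dlv_maps a)

-- ===== LEMMAS AND PROOFS =====

-- base-26 digits of n, least significant first (proof-side characterization)
def pvND : Nat → List Int
  | 0 => []
  | n + 1 => (((n + 1) % 26 : Nat) : Int) :: pvND ((n + 1) / 26)
decreasing_by omega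

lemma pvInc_pvND (n : Nat) : pvInc (pvND n) = pvND (n + 1) := by
  induction n using Nat.strong_induction_on with
  | _ n ih =>
    match n with
    | 0 => simp [pvND, pvInc]
    | n + 1 =>
      rw [pvND]
      by_cases h : (n + 1) % 26 = 25
      · have h2 : (n + 2) % 26 = 0 ∧ (n + 2) / 26 = (n + 1) / 26 + 1 := by omega
        rw [pvInc]
        rw [if_neg (by push_cast [h]; norm_num)]
        rw [ih ((n + 1) / 26) (by omega)]
        conv_rhs => rw [pvND]
        rw [h2.1, h2.2]
        simp
      · have h2 : (n + 2) % 26 = (n + 1) % 26 + 1 ∧ (n + 2) / 26 = (n + 1) / 26 := by omega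
        rw [pvInc]
        rw [if_pos (by push_cast; omega)]
        conv_rhs => rw [pvND]
        rw [h2.1, h2.2]
        push_cast
        simp

lemma pvAInner_eq (x : Int) (s : List Char) :
    pvAInner x s = s ++ (pvND x.toNat).map (fun d => Char.ofNat (d + 97).toNat) := by
  induction x, s using pvAInner.induct with
  | case1 x s hx ih =>
    rw [pvAInner, if_pos hx]
    rw [ih]
    have hx1 : x.toNat = (x.toNat - 1) + 1 := by omega
    rw [hx1, pvND]
    have hmod : PySem.Int.mod x 26 = ((((x.toNat - 1) + 1) % 26 : Nat) : Int) := by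
      rw [PySem.Int.mod_eq_emod_of_pos (by norm_num : (0:Int) < 26)]; omega
    have hdiv : (PySem.Int.floordiv x 26).toNat = ((x.toNat - 1) + 1) / 26 := by
      rw [PySem.Int.floordiv_eq_ediv_of_pos (by norm_num : (0:Int) < 26)]; omega
    rw [hmod, hdiv]
    simp
  | case2 x s hx =>
    rw [pvAInner, if_neg hx]
    have : x.toNat = 0 := by omega
    rw [this]
    simp [pvND]

lemma pv_loop (n : Nat) : ∀ (i : Int) (d1 : PySem.Dict Int String) (d2 : PySem.Dict String Int),
    1 ≤ i →
    (PySem.List.pyRange i (i + n) 1).foldl pvStepA (d1, d2)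
      = (((PySem.List.pyRange i (i + n) 1).foldl pvStepB (d1, d2, pvND i.toNat)).1,
         ((PySem.List.pyRange i (i + n) 1).foldl pvStepB (d1, d2, pvND i.toNat)).2.1) := by
  induction n with
  | zero =>
    intro i d1 d2 _
    rw [PySem.List.pyRange_one_eq_nil (by omega)]
    simp
  | succ n ih =>
    intro i d1 d2 hi
    rw [PySem.List.pyRange_one_cons (by push_cast; omega)]
    simp only [List.foldl_cons]
    have hs : pvAInner i [] = (pvND i.toNat).map (fun d => Char.ofNat (d + 97).toNat) := by
      rw [pvAInner_eq]; simp
    have hstep : pvStepA (d1, d2) i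
        = ((pvStepB (d1, d2, pvND i.toNat) i).1, (pvStepB (d1, d2, pvND i.toNat) i).2.1) := by
      simp [pvStepA, pvStepB, hs]
    have hdig : (pvStepB (d1, d2, pvND i.toNat) i).2.2 = pvND (i + 1).toNat := by
      simp only [pvStepB]
      rw [pvInc_pvND]
      congr 1
      omega
    have hb : i + ((n : Int) + 1) = (i + 1) + (n : Int) := by ring
    push_cast
    rw [hb, hstep]
    rw [ih (i + 1) _ _ (by omega), ← hdig]

-- ===== VERDICT (by name: the statement is the Claim_ definition above) =====
theorem generate_dlv_maps_spec : Claim_equal_generate_dlv_maps := by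
  intro a _
  unfold Spec_generate_dlv_maps generate_dlv_maps generate_dlv_maps_alt
  by_cases ha : a ≤ 0
  · rw [PySem.List.pyRange_one_eq_nil (by omega)]
    rfl
  · have h1 : a + 1 = 1 + ((a.toNat : Int)) := by omega
    rw [h1, pv_loop a.toNat 1 _ _ (by omega)]
    norm_num [pvND]
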